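-- pv_equiv track=rewrite | github.com/pvdwijdeven/DSA_Python3 | G4G/DSA Course/Sorting/FindTriangles.py | number_of_triangles
-- ===== SOURCE A (Python) =====
-- def number_of_triangles(arr) -> int:
-- 	n = len(arr)
-- 	arr.sort()
-- 	count = 0
-- 	for i in range(0, n - 2):
-- 		k = i + 2
-- 		for j in range(i + 1, n):
-- 			while k < n and arr[i] + arr[j] > arr[k]:
-- 				k += 1
-- 			if k > j:
-- 				count += k - j - 1
-- 	return count
-- ===== SOURCE B (Python) =====
-- def number_of_triangles(arr) -> int:
-- 	arr.sort()
-- 	n = len(arr)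
-- 	count = 0
-- 	for i in range(0, n - 2):
-- 		for j in range(i + 1, n - 1):
-- 			for k in range(j + 1, n):
-- 				if arr[i] + arr[j] > arr[k]:
-- 					count += 1
-- 	return count
-- ===== Notes on version B (the rewrite author's own statement) =====
-- stated objective: simpler
-- what changed: Replaces A's incremental non-resetting two-pointer scan with a plain triple loop over sorted indices i<j<k counting arr[i]+arr[j]>arr[k], trading the O(n^2) pointer bookkeeping for the obvious O(n^3) check.
import Mathlib
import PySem

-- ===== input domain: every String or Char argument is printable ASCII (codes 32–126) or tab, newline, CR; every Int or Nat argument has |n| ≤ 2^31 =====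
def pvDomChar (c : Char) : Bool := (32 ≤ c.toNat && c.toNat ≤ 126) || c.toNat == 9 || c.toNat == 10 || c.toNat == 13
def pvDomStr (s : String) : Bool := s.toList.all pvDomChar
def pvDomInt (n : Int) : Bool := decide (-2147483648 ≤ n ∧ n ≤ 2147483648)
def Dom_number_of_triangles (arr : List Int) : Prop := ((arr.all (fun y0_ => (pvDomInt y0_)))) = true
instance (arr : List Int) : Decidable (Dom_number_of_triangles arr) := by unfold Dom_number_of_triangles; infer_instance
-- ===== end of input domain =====

-- B replaces A's incremental two-pointer scan with a plain triple loop over sorted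
-- indices i<j<k (simpler, same count); both Pythons sort the argument in place, the
-- equivalence proved here is about the return value.

-- ===== PORT A =====
-- the 'while k < n and arr[i] + arr[j] > arr[k]: k += 1' loop of A
def ntAdvance (s : List Int) (n a b k : Int) : Int :=
  if h : k < n ∧ a + b > PySem.List.pyGetD s k 0 then ntAdvance s n a b (k + 1) else k
termination_by (n - k).toNat
decreasing_by omega

def number_of_triangles (arr : List Int) : Int :=
  let n : Int := (arr.length : Int)
  let s := PySem.List.sorted arr id
  (PySem.List.pyRange 0 (n - 2)).foldl (fun count i =>
    ((PySem.List.pyRange (i + 1) n).foldl (fun (st : Int × Int) j =>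
      let k := ntAdvance s n (PySem.List.pyGetD s i 0) (PySem.List.pyGetD s j 0) st.1
      (k, if k > j then st.2 + (k - j - 1) else st.2)) (i + 2, count)).2) 0

-- ===== PORT B =====
def number_of_triangles_alt (arr : List Int) : Int :=
  let s := PySem.List.sorted arr id
  let n : Int := (s.length : Int)
  (PySem.List.pyRange 0 (n - 2)).foldl (fun count i =>
    (PySem.List.pyRange (i + 1) (n - 1)).foldl (fun count j =>
      (PySem.List.pyRange (j + 1) n).foldl (fun count k =>
        if PySem.List.pyGetD s i 0 + PySem.List.pyGetD s j 0 > PySem.List.pyGetD s k 0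
        then count + 1 else count) count) count) 0

-- ===== PRECONDITION & SPEC =====
def Spec_number_of_triangles (arr : List Int) (out : Int) : Prop := out = number_of_triangles_alt arr
instance (arr : List Int) (out : Int) : Decidable (Spec_number_of_triangles arr out) := by unfold Spec_number_of_triangles; infer_instance

-- ===== CLAIM (what is proved, stated in full; the proofs are below) =====
def Claim_equal_number_of_triangles : Prop := ∀ (arr : List Int), Dom_number_of_triangles arr → Spec_number_of_triangles arr (number_of_triangles arr)

-- ===== LEMMAS AND PROOFS =====

-- number of valid third sides k ∈ (j, n) for the pair (i, j), on the sorted list s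
def ntC (s : List Int) (n i j : Int) : Int :=
  (((PySem.List.pyRange (j + 1) n).filter
    (fun m => decide (PySem.List.pyGetD s i 0 + PySem.List.pyGetD s j 0 > PySem.List.pyGetD s m 0))).length : Int)

lemma nt_mono (s : List Int) (hs : List.Pairwise (· ≤ ·) s) (a b : Int)
    (h0 : 0 ≤ a) (hab : a ≤ b) (hb : b < (s.length : Int)) :
    PySem.List.pyGetD s a 0 ≤ PySem.List.pyGetD s b 0 := by
  rw [PySem.List.pyGetD_eq_getElem s 0 h0 (by omega),
      PySem.List.pyGetD_eq_getElem s 0 (by omega) hb]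
  rcases eq_or_lt_of_le hab with h | h
  · subst h; exact le_refl _
  · exact List.pairwise_iff_getElem.mp hs a.toNat b.toNat (by omega) (by omega) (by omega)

lemma ntAdvance_spec (s : List Int) (n a b : Int) :
    ∀ k, k ≤ n →
      k ≤ ntAdvance s n a b k ∧ ntAdvance s n a b k ≤ n ∧
      (∀ m, k ≤ m → m < ntAdvance s n a b k → a + b > PySem.List.pyGetD s m 0) ∧
      ¬(ntAdvance s n a b k < n ∧ a + b > PySem.List.pyGetD s (ntAdvance s n a b k) 0) := by
  intro k hk
  induction k using ntAdvance.induct s n a b with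
  | case1 k h ih =>
    rw [ntAdvance, dif_pos h]
    obtain ⟨h1, h2, h3, h4⟩ := ih (by omega)
    refine ⟨by omega, h2, ?_, h4⟩
    intro m hm1 hm2
    rcases eq_or_lt_of_le hm1 with h' | h'
    · subst h'; exact h.2
    · exact h3 m (by omega) hm2
  | case2 k h =>
    rw [ntAdvance, dif_neg h]
    exact ⟨le_refl _, hk, fun _ hm1 hm2 => absurd (lt_of_le_of_lt hm1 hm2) (lt_irrefl k), h⟩

-- the amount A adds for a fixed pair (i, j) equals ntC
lemma nt_step (s : List Int) (hs : List.Pairwise (· ≤ ·) s) (n i j k : Int)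
    (hn : n = (s.length : Int)) (hi : 0 ≤ i) (hj1 : i + 1 ≤ j) (_hjn : j < n)
    (hk1 : i + 2 ≤ k) (hk2 : k ≤ n)
    (hinv : ∀ m, i + 2 ≤ m → m < k → PySem.List.pyGetD s i 0 + PySem.List.pyGetD s j 0 > PySem.List.pyGetD s m 0) :
    (if ntAdvance s n (PySem.List.pyGetD s i 0) (PySem.List.pyGetD s j 0) k > j
     then ntAdvance s n (PySem.List.pyGetD s i 0) (PySem.List.pyGetD s j 0) k - j - 1 else 0)
      = ntC s n i j := by
  obtain ⟨h1, h2, h3, h4⟩ := ntAdvance_spec s n (PySem.List.pyGetD s i 0) (PySem.List.pyGetD s j 0) k hk2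
  set k' := ntAdvance s n (PySem.List.pyGetD s i 0) (PySem.List.pyGetD s j 0) k with hk'
  -- cond holds on [i+2, k'), fails on [k', n)
  have hall : ∀ m, i + 2 ≤ m → m < k' →
      PySem.List.pyGetD s i 0 + PySem.List.pyGetD s j 0 > PySem.List.pyGetD s m 0 := by
    intro m hm1 hm2
    by_cases h : m < k
    · exact hinv m hm1 h
    · exact h3 m (by omega) hm2
  have hnone : ∀ m, k' ≤ m → m < n →
      ¬ (PySem.List.pyGetD s i 0 + PySem.List.pyGetD s j 0 > PySem.List.pyGetD s m 0) := by
    intro m hm1 hm2 hcon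
    have hk'n : k' < n := by omega
    have hmono : PySem.List.pyGetD s k' 0 ≤ PySem.List.pyGetD s m 0 :=
      nt_mono s hs k' m (by omega) hm1 (by omega)
    exact h4 ⟨hk'n, by omega⟩
  unfold ntC
  by_cases hcase : j + 1 < k'
  · -- filter = pyRange (j+1) k'
    rw [PySem.List.pyRange_one_append (j + 1) k' n (by omega) h2]
    rw [List.filter_append]
    rw [List.filter_eq_self.mpr (by
      intro m hm
      rw [PySem.List.mem_pyRange_one] at hm
      exact decide_eq_true (hall m (by omega) hm.2))]
    rw [List.filter_eq_nil_iff.mpr (by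
      intro m hm
      rw [PySem.List.mem_pyRange_one] at hm
      simpa using hnone m hm.1 hm.2)]
    rw [if_pos (by omega)]
    simp [PySem.List.length_pyRange_one]
    omega
  · -- no valid third side
    rw [List.filter_eq_nil_iff.mpr (by
      intro m hm
      rw [PySem.List.mem_pyRange_one] at hm
      simpa using hnone m (by omega) hm.2)]
    simp
    omega

-- A's inner loop over j computes the sum of ntC over the remaining j's
lemma nt_innerA (s : List Int) (hs : List.Pairwise (· ≤ ·) s) (n i : Int)
    (hn : n = (s.length : Int)) (hi : 0 ≤ i) :
    ∀ (fuel : Nat) (j k c : Int), (n - j).toNat ≤ fuel →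
      i + 1 ≤ j → j ≤ n → i + 2 ≤ k → k ≤ n →
      (j < n → ∀ m, i + 2 ≤ m → m < k →
        PySem.List.pyGetD s i 0 + PySem.List.pyGetD s j 0 > PySem.List.pyGetD s m 0) →
      ((PySem.List.pyRange j n).foldl (fun (st : Int × Int) j' =>
          (ntAdvance s n (PySem.List.pyGetD s i 0) (PySem.List.pyGetD s j' 0) st.1,
           if ntAdvance s n (PySem.List.pyGetD s i 0) (PySem.List.pyGetD s j' 0) st.1 > j' then
             st.2 + (ntAdvance s n (PySem.List.pyGetD s i 0) (PySem.List.pyGetD s j' 0) st.1 - j' - 1)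
           else st.2)) (k, c)).2
        = c + ((PySem.List.pyRange j n).map (fun j' => ntC s n i j')).sum := by
  intro fuel
  induction fuel with
  | zero =>
    intro j k c hf hj1 hj2 hk1 hk2 hinv
    have hjn : n ≤ j := by omega
    rw [PySem.List.pyRange_one_eq_nil hjn]
    simp
  | succ f ih =>
    intro j k c hf hj1 hj2 hk1 hk2 hinv
    by_cases hjn : j < n
    · rw [PySem.List.pyRange_one_cons hjn]
      simp only [List.foldl_cons, List.map_cons, List.sum_cons]
      obtain ⟨h1, h2, h3, h4⟩ := ntAdvance_spec s n (PySem.List.pyGetD s i 0) (PySem.List.pyGetD s j 0) k hk2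
      set k' := ntAdvance s n (PySem.List.pyGetD s i 0) (PySem.List.pyGetD s j 0) k with hk'
      have hstep := nt_step s hs n i j k hn hi hj1 hjn hk1 hk2 (hinv hjn)
      rw [← hk'] at hstep
      have hall : ∀ m, i + 2 ≤ m → m < k' →
          PySem.List.pyGetD s i 0 + PySem.List.pyGetD s j 0 > PySem.List.pyGetD s m 0 := by
        intro m hm1 hm2
        by_cases h : m < k
        · exact hinv hjn m hm1 h
        · exact h3 m (by omega) hm2
      have ihres := ih (j + 1) k' (if k' > j then c + (k' - j - 1) else c) (by omega)
        (by omega) (by omega) (by omega) h2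
        (by
          intro hj1n m hm1 hm2
          have hcur := hall m hm1 hm2
          have : PySem.List.pyGetD s j 0 ≤ PySem.List.pyGetD s (j + 1) 0 :=
            nt_mono s hs j (j + 1) (by omega) (by omega) (by omega)
          omega)
      rw [ihres]
      split_ifs with hgt
      · rw [if_pos hgt] at hstep; omega
      · rw [if_neg hgt] at hstep; omega
    · rw [PySem.List.pyRange_one_eq_nil (by omega)]
      simp

-- a fold that conditionally increments counts the filtered elements
lemma nt_count_fold (s : List Int) (i j : Int) :
    ∀ (l : List Int) (c : Int),
      l.foldl (fun c k =>
        if PySem.List.pyGetD s i 0 + PySem.List.pyGetD s j 0 > PySem.List.pyGetD s k 0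
        then c + 1 else c) c
      = c + ((l.filter (fun m => decide (PySem.List.pyGetD s i 0 + PySem.List.pyGetD s j 0 > PySem.List.pyGetD s m 0))).length : Int) := by
  intro l
  induction l with
  | nil => intro c; simp
  | cons x xs ih =>
    intro c
    simp only [List.foldl_cons, List.filter_cons]
    by_cases h : PySem.List.pyGetD s i 0 + PySem.List.pyGetD s j 0 > PySem.List.pyGetD s x 0
    · rw [if_pos h, ih, if_pos (decide_eq_true h)]
      simp; omega
    · rw [if_neg h, ih, if_neg (by simpa using h)]

-- B's inner double loop computes the same sum of ntC
lemma nt_innerB (s : List Int) (n i : Int) :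
    ∀ (l : List Int) (c : Int),
      l.foldl (fun c j =>
        (PySem.List.pyRange (j + 1) n).foldl (fun c k =>
          if PySem.List.pyGetD s i 0 + PySem.List.pyGetD s j 0 > PySem.List.pyGetD s k 0
          then c + 1 else c) c) c
      = c + (l.map (fun j => ntC s n i j)).sum := by
  intro l
  induction l with
  | nil => intro c; simp
  | cons x xs ih =>
    intro c
    simp only [List.foldl_cons, List.map_cons, List.sum_cons]
    rw [nt_count_fold, ih]
    unfold ntC
    omega

lemma nt_last_zero (s : List Int) (n i : Int) : ntC s n i (n - 1) = 0 := by
  unfold ntC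
  rw [show n - 1 + 1 = n by omega, PySem.List.pyRange_one_eq_nil (le_refl n)]
  simp

-- per-i equality of A's and B's contributions, folded over any list of valid i's
lemma nt_outer (s : List Int) (hs : List.Pairwise (· ≤ ·) s) (n : Int)
    (hn : n = (s.length : Int)) :
    ∀ (l : List Int) (c : Int), (∀ i ∈ l, 0 ≤ i ∧ i < n - 2) →
      l.foldl (fun count i =>
        ((PySem.List.pyRange (i + 1) n).foldl (fun (st : Int × Int) j =>
          (ntAdvance s n (PySem.List.pyGetD s i 0) (PySem.List.pyGetD s j 0) st.1,
           if ntAdvance s n (PySem.List.pyGetD s i 0) (PySem.List.pyGetD s j 0) st.1 > j then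
             st.2 + (ntAdvance s n (PySem.List.pyGetD s i 0) (PySem.List.pyGetD s j 0) st.1 - j - 1)
           else st.2)) (i + 2, count)).2) c
      = l.foldl (fun count i =>
          (PySem.List.pyRange (i + 1) (n - 1)).foldl (fun count j =>
            (PySem.List.pyRange (j + 1) n).foldl (fun count k =>
              if PySem.List.pyGetD s i 0 + PySem.List.pyGetD s j 0 > PySem.List.pyGetD s k 0
              then count + 1 else count) count) count) c := by
  intro l
  induction l with
  | nil => intro c _; rfl
  | cons x xs ih =>
    intro c hmem
    obtain ⟨hx0, hxn⟩ := hmem x (List.mem_cons_self ..)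
    simp only [List.foldl_cons]
    rw [nt_innerA s hs n x hn hx0 (n - (x + 1)).toNat (x + 1) (x + 2) c (le_refl _)
        (by omega) (by omega) (by omega) (by omega) (by intro _ m hm1 hm2; omega)]
    rw [nt_innerB s n]
    have hsum : ((PySem.List.pyRange (x + 1) n).map (fun j' => ntC s n x j')).sum
        = ((PySem.List.pyRange (x + 1) (n - 1)).map (fun j => ntC s n x j)).sum := by
      rw [PySem.List.pyRange_one_append (x + 1) (n - 1) n (by omega) (by omega)]
      have hsing : PySem.List.pyRange (n - 1) n = [n - 1] := by
        have h := PySem.List.pyRange_one_singleton (n - 1)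
        rwa [show n - 1 + 1 = n by omega] at h
      rw [hsing, List.map_append, List.sum_append]
      simp [nt_last_zero]
    rw [hsum]
    exact ih _ (fun i hi => hmem i (List.mem_cons_of_mem x hi))

-- ===== VERDICT (by name: the statement is the Claim_ definition above) =====
theorem number_of_triangles_spec : Claim_equal_number_of_triangles := by
  intro arr _
  unfold Spec_number_of_triangles
  simp only [number_of_triangles, number_of_triangles_alt]
  have hs : List.Pairwise (· ≤ ·) (PySem.List.sorted arr id) := by
    simpa using PySem.List.sorted_pairwise arr id
  have hlen : ((PySem.List.sorted arr id).length : Int) = (arr.length : Int) := by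
    rw [PySem.List.length_sorted]
  rw [← hlen]
  exact nt_outer (PySem.List.sorted arr id) hs ((PySem.List.sorted arr id).length : Int) rfl
    (PySem.List.pyRange 0 (((PySem.List.sorted arr id).length : Int) - 2)) 0
    (fun i hi => by rw [PySem.List.mem_pyRange_one] at hi; exact ⟨hi.1, hi.2⟩)
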